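-- pv_equiv track=rewrite | github.com/antoinefalisse/predsim_tutorial | utilities.py | getMomentArmIndices
-- ===== SOURCE A (Python) =====
-- def getMomentArmIndices(rightMuscles, leftPolynomialJoints,
--                         rightPolynomialJoints, polynomialData):
--
--     momentArmIndices = {}
--     for count, muscle in enumerate(rightMuscles):
--         spanning = polynomialData[muscle]['spanning']
--         for i in range(len(spanning)):
--             if (spanning[i] == 1):
--                 momentArmIndices.setdefault(
--                         leftPolynomialJoints[i], []).append(count)
--     for count, muscle in enumerate(rightMuscles):
--         spanning = polynomialData[muscle]['spanning']
--         for i in range(len(spanning)):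
--             if (spanning[i] == 1):
--                 momentArmIndices.setdefault(
--                         rightPolynomialJoints[i], []).append(
--                                 count + len(rightMuscles))
--
--     return momentArmIndices
-- ===== SOURCE B (Python) =====
-- def getMomentArmIndices(rightMuscles, leftPolynomialJoints,
--                         rightPolynomialJoints, polynomialData):
--     # Per-key selection instead of incremental dict mutation: determine the key order
--     # (first occurrence), then compute each joint's index list independently by filtering.
--     n = len(rightMuscles)
--     spans = [polynomialData[m]['spanning'] for m in rightMuscles]
--
--     def select(joints, key):
--         # muscle indices whose spanning flag hits a position labelled `key`
--         return [c for c, sp in enumerate(spans)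
--                 for i in range(len(sp)) if sp[i] == 1 and joints[i] == key]
--
--     keys = []
--     for joints in (leftPolynomialJoints, rightPolynomialJoints):
--         for sp in spans:
--             for i in range(len(sp)):
--                 if sp[i] == 1 and joints[i] not in keys:
--                     keys.append(joints[i])
--
--     return {key: select(leftPolynomialJoints, key)
--                  + [c + n for c in select(rightPolynomialJoints, key)]
--             for key in keys}
-- ===== Notes on version B (the rewrite author's own statement) =====
-- stated objective: alternative
-- what changed: B never mutates a dict incrementally: it first determines the key order (first occurrence of each joint over the spanning positions), then computes every joint's index list independently by filtering the muscle indices per key, trading A's single grouped pass for a per-key selection scan.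
import Mathlib
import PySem

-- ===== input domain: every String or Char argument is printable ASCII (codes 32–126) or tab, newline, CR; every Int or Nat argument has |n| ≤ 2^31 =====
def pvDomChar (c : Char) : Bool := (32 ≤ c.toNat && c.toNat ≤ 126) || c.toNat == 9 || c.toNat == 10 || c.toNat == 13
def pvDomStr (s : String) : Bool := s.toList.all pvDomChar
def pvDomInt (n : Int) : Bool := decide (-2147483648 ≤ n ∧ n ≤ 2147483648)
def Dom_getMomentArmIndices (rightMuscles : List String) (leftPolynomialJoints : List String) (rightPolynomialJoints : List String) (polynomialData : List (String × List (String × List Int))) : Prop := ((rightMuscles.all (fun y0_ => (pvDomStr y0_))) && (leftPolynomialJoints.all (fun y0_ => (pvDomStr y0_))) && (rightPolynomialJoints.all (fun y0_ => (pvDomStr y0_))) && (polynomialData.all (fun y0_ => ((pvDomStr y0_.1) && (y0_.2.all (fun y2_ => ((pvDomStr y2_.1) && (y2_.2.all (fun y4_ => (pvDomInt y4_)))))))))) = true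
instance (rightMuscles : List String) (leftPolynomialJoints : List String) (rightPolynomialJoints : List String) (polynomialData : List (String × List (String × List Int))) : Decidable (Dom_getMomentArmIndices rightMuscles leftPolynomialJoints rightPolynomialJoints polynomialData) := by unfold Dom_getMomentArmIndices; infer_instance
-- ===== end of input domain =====

-- B replaces A's incremental dict building by per-key selection: it first determines the key
-- order (first occurrences), then computes each joint's index list independently by filtering;
-- objective: alternative algorithm, same results.

-- ===== PORT A =====
-- shared helper: polynomialData[muscle]['spanning'] (first-match association-list lookup;
-- the defaults are unreachable under Pre_, where both keys are present)
def pvSpanning (pd : List (String × List (String × List Int))) (m : String) : List Int :=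
  (((((pd.find? (fun p => p.1 == m)).map (·.2)).getD []).find? (fun q => q.1 == "spanning")).map (·.2)).getD []

def getMomentArmIndices (rightMuscles : List String) (leftPolynomialJoints : List String) (rightPolynomialJoints : List String) (polynomialData : List (String × List (String × List Int))) : List (String × List Int) :=
  let d1 : PySem.Dict String (List Int) :=
    (PySem.List.enumerate rightMuscles).foldl (fun d cm =>
      let spanning := pvSpanning polynomialData cm.2
      (PySem.List.pyRange 0 (PySem.List.len spanning) 1).foldl (fun d i =>
        if PySem.List.pyGetD spanning i 0 = 1 then
          d.modify (PySem.List.pyGetD leftPolynomialJoints i "") [] (fun l => l ++ [cm.1])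
        else d) d) PySem.Dict.empty
  let d2 : PySem.Dict String (List Int) :=
    (PySem.List.enumerate rightMuscles).foldl (fun d cm =>
      let spanning := pvSpanning polynomialData cm.2
      (PySem.List.pyRange 0 (PySem.List.len spanning) 1).foldl (fun d i =>
        if PySem.List.pyGetD spanning i 0 = 1 then
          d.modify (PySem.List.pyGetD rightPolynomialJoints i "") [] (fun l => l ++ [cm.1 + PySem.List.len rightMuscles])
        else d) d) d1
  d2.items

-- ===== PORT B =====
-- Source B's `select(joints, key)`: muscle indices whose spanning flag hits a position labelled `key`
def pvSelect (spans : List (List Int)) (joints : List String) (key : String) : List Int :=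
  (PySem.List.enumerate spans).flatMap (fun cs =>
    (PySem.List.pyRange 0 (PySem.List.len cs.2) 1).filterMap (fun i =>
      if PySem.List.pyGetD cs.2 i 0 = 1 ∧ PySem.List.pyGetD joints i "" = key then some cs.1 else none))

def getMomentArmIndices_alt (rightMuscles : List String) (leftPolynomialJoints : List String) (rightPolynomialJoints : List String) (polynomialData : List (String × List (String × List Int))) : List (String × List Int) :=
  let n : Int := PySem.List.len rightMuscles
  let spans : List (List Int) := rightMuscles.map (fun m => pvSpanning polynomialData m)
  let keys : List String :=
    [leftPolynomialJoints, rightPolynomialJoints].foldl (fun ks joints =>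
      spans.foldl (fun ks sp =>
        (PySem.List.pyRange 0 (PySem.List.len sp) 1).foldl (fun ks i =>
          if PySem.List.pyGetD sp i 0 = 1 ∧ ¬ (ks.contains (PySem.List.pyGetD joints i "") = true)
          then ks ++ [PySem.List.pyGetD joints i ""] else ks) ks) ks) []
  keys.map (fun key =>
    (key, pvSelect spans leftPolynomialJoints key ++
          (pvSelect spans rightPolynomialJoints key).map (fun c => c + n)))

-- ===== PRECONDITION & SPEC =====
-- Pre_ excludes exactly the inputs on which Python A raises: a muscle missing from
-- polynomialData or lacking 'spanning' (KeyError), or a spanning flag equal to 1 at a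
-- position with no corresponding left/right joint name (IndexError).
def Pre_getMomentArmIndices (rightMuscles : List String) (leftPolynomialJoints : List String) (rightPolynomialJoints : List String) (polynomialData : List (String × List (String × List Int))) : Prop :=
  (rightMuscles.all (fun m =>
    match polynomialData.find? (fun p => p.1 == m) with
    | none => false
    | some e =>
      match e.2.find? (fun q => q.1 == "spanning") with
      | none => false
      | some q =>
        (List.range q.2.length).all (fun i =>
          q.2.getD i 0 != 1 ||
            (decide (i < leftPolynomialJoints.length) && decide (i < rightPolynomialJoints.length))))) = true
instance (rightMuscles : List String) (leftPolynomialJoints : List String) (rightPolynomialJoints : List String) (polynomialData : List (String × List (String × List Int))) : Decidable (Pre_getMomentArmIndices rightMuscles leftPolynomialJoints rightPolynomialJoints polynomialData) := by unfold Pre_getMomentArmIndices; infer_instance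

def pvWitness_getMomentArmIndices : List String × List String × List String × (List (String × List (String × List Int))) :=
  (["m1", "m2"], ["hipL", "kneeL"], ["hipR", "kneeR"],
   [("m1", [("spanning", [1, 0])]), ("m2", [("spanning", [1, 1])])])

def Spec_getMomentArmIndices (rightMuscles : List String) (leftPolynomialJoints : List String) (rightPolynomialJoints : List String) (polynomialData : List (String × List (String × List Int))) (out : List (String × List Int)) : Prop := out = getMomentArmIndices_alt rightMuscles leftPolynomialJoints rightPolynomialJoints polynomialData
instance (rightMuscles : List String) (leftPolynomialJoints : List String) (rightPolynomialJoints : List String) (polynomialData : List (String × List (String × List Int))) (out : List (String × List Int)) : Decidable (Spec_getMomentArmIndices rightMuscles leftPolynomialJoints rightPolynomialJoints polynomialData out) := by unfold Spec_getMomentArmIndices; infer_instance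

-- ===== CLAIM (what is proved, stated in full; the proofs are below) =====
def Claim_equal_getMomentArmIndices : Prop := ∀ (rightMuscles : List String) (leftPolynomialJoints : List String) (rightPolynomialJoints : List String) (polynomialData : List (String × List (String × List Int))), Dom_getMomentArmIndices rightMuscles leftPolynomialJoints rightPolynomialJoints polynomialData → Pre_getMomentArmIndices rightMuscles leftPolynomialJoints rightPolynomialJoints polynomialData → Spec_getMomentArmIndices rightMuscles leftPolynomialJoints rightPolynomialJoints polynomialData (getMomentArmIndices rightMuscles leftPolynomialJoints rightPolynomialJoints polynomialData)

-- ===== LEMMAS AND PROOFS =====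

-- the flat (joint, muscle-index) pair list of one of A's two phases (proof-side abstraction)
def pvPhase (rightMuscles : List String) (pd : List (String × List (String × List Int))) (joints : List String) (v : Int → Int) : List (String × Int) :=
  (PySem.List.enumerate rightMuscles).flatMap (fun cm =>
    (PySem.List.enumerate (pvSpanning pd cm.2)).filterMap (fun is =>
      if is.2 = 1 then some (PySem.List.pyGetD joints is.1 "", v cm.1) else none))

-- A's per-muscle index loop equals the dict-fold of that muscle's filtered enumerate-pairs
theorem pv_inner_eq (sp : List Int) (joints : List String) (w : Int)
    (d : PySem.Dict String (List Int)) :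
    (PySem.List.pyRange 0 (PySem.List.len sp) 1).foldl (fun d i =>
        if PySem.List.pyGetD sp i 0 = 1 then
          d.modify (PySem.List.pyGetD joints i "") [] (fun l => l ++ [w])
        else d) d
      = ((PySem.List.enumerate sp).filterMap (fun is =>
          if is.2 = 1 then some (PySem.List.pyGetD joints is.1 "", w) else none)).foldl
          (fun d p => d.modify p.1 [] (fun l => l ++ [p.2])) d := by
  rw [PySem.List.enumerate_eq_map_pyRange (d := 0), List.filterMap_map]
  generalize PySem.List.pyRange 0 (PySem.List.len sp) 1 = l
  induction l generalizing d with
  | nil => rfl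
  | cons x xs ih =>
    by_cases h : PySem.List.pyGetD sp x 0 = 1 <;>
      simp [h, ih, Function.comp]

-- A's per-phase nested loop equals the dict-fold of the flattened pair list of that phase
theorem pv_phase_eq (pd : List (String × List (String × List Int))) (joints : List String)
    (v : Int → Int) (l : List (Int × String)) (d : PySem.Dict String (List Int)) :
    l.foldl (fun d cm =>
        (PySem.List.pyRange 0 (PySem.List.len (pvSpanning pd cm.2)) 1).foldl (fun d i =>
          if PySem.List.pyGetD (pvSpanning pd cm.2) i 0 = 1 then
            d.modify (PySem.List.pyGetD joints i "") [] (fun l => l ++ [v cm.1])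
          else d) d) d
      = (l.flatMap (fun cm =>
          (PySem.List.enumerate (pvSpanning pd cm.2)).filterMap (fun is =>
            if is.2 = 1 then some (PySem.List.pyGetD joints is.1 "", v cm.1) else none))).foldl
          (fun d p => d.modify p.1 [] (fun l => l ++ [p.2])) d := by
  induction l generalizing d with
  | nil => rfl
  | cons cm rest ih =>
    simp only [List.foldl_cons, List.flatMap_cons, List.foldl_append]
    rw [← ih, pv_inner_eq]

-- instantiation of pv_phase_eq at A's actual loop, phrased with pvPhase
theorem pv_phase_eq' (rM : List String) (pd : List (String × List (String × List Int)))
    (joints : List String) (v : Int → Int) (d : PySem.Dict String (List Int)) :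
    (PySem.List.enumerate rM).foldl (fun d cm =>
        (PySem.List.pyRange 0 (PySem.List.len (pvSpanning pd cm.2)) 1).foldl (fun d i =>
          if PySem.List.pyGetD (pvSpanning pd cm.2) i 0 = 1 then
            d.modify (PySem.List.pyGetD joints i "") [] (fun l => l ++ [v cm.1])
          else d) d) d
      = (pvPhase rM pd joints v).foldl (fun d p => d.modify p.1 [] (fun l => l ++ [p.2])) d :=
  pv_phase_eq pd joints v (PySem.List.enumerate rM) d

-- enumerate of a mapped list
theorem pv_enumerate_map {α β : Type} (l : List α) (f : α → β) (s : Int) :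
    PySem.List.enumerate (l.map f) s = (PySem.List.enumerate l s).map (fun p => (p.1, f p.2)) := by
  induction l generalizing s with
  | nil => rfl
  | cons x xs ih => simp [PySem.List.enumerate_cons, ih]

-- B's select, mapped by the phase's value function, is the filtered pair list's values
theorem pv_select_eq (rM : List String) (pd : List (String × List (String × List Int)))
    (joints : List String) (key : String) (v : Int → Int) :
    (pvSelect (rM.map (fun m => pvSpanning pd m)) joints key).map v
      = ((pvPhase rM pd joints v).filter (fun p => p.1 == key)).map (·.2) := by
  unfold pvSelect pvPhase
  rw [pv_enumerate_map]
  simp only [List.flatMap_map, List.map_flatMap, List.filter_flatMap]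
  apply List.flatMap_congr
  intro cm _
  rw [PySem.List.enumerate_eq_map_pyRange (d := 0), List.filterMap_map]
  generalize PySem.List.pyRange 0 (PySem.List.len (pvSpanning pd cm.2)) 1 = l
  induction l with
  | nil => rfl
  | cons i is ih =>
    by_cases h1 : PySem.List.pyGetD (pvSpanning pd cm.2) i 0 = 1
    · by_cases h2 : PySem.List.pyGetD joints i "" = key <;>
        simp [h1, h2, ih, Function.comp]
    · simp [h1, ih, Function.comp]

-- B's per-position key loop is a Set.add fold over the emitted keys
theorem pv_keys_inner_eq (sp : List Int) (joints : List String) (ks : List String) :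
    (PySem.List.pyRange 0 (PySem.List.len sp) 1).foldl (fun ks i =>
        if PySem.List.pyGetD sp i 0 = 1 ∧ ¬ (ks.contains (PySem.List.pyGetD joints i "") = true)
        then ks ++ [PySem.List.pyGetD joints i ""] else ks) ks
      = ((PySem.List.enumerate sp).filterMap (fun is =>
          if is.2 = 1 then some (PySem.List.pyGetD joints is.1 "") else none)).foldl
          PySem.Set.add ks := by
  have hstep : (fun (ks : List String) (i : Int) =>
      if PySem.List.pyGetD sp i 0 = 1 ∧ ¬ (ks.contains (PySem.List.pyGetD joints i "") = true)
      then ks ++ [PySem.List.pyGetD joints i ""] else ks)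
      = (fun (ks : List String) (i : Int) =>
      if PySem.List.pyGetD sp i 0 = 1 then PySem.Set.add ks (PySem.List.pyGetD joints i "") else ks) := by
    funext ks i
    by_cases h1 : PySem.List.pyGetD sp i 0 = 1 <;>
      by_cases h2 : ks.contains (PySem.List.pyGetD joints i "") = true <;>
        simp_all [PySem.Set.add, PySem.Set.contains]
  rw [hstep, PySem.List.enumerate_eq_map_pyRange (d := 0), List.filterMap_map]
  generalize PySem.List.pyRange 0 (PySem.List.len sp) 1 = l
  induction l generalizing ks with
  | nil => rfl
  | cons i is ih =>
    by_cases h1 : PySem.List.pyGetD sp i 0 = 1 <;> simp [h1, ih, Function.comp]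

-- B's whole keys loop for one joint list is a Set.add fold over that phase's keys
theorem pv_keys_phase_eq (rM : List String) (pd : List (String × List (String × List Int)))
    (joints : List String) (v : Int → Int) (ks : List String) :
    (rM.map (fun m => pvSpanning pd m)).foldl (fun ks sp =>
        (PySem.List.pyRange 0 (PySem.List.len sp) 1).foldl (fun ks i =>
          if PySem.List.pyGetD sp i 0 = 1 ∧ ¬ (ks.contains (PySem.List.pyGetD joints i "") = true)
          then ks ++ [PySem.List.pyGetD joints i ""] else ks) ks) ks
      = ((pvPhase rM pd joints v).map (·.1)).foldl PySem.Set.add ks := by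
  unfold pvPhase
  rw [List.foldl_map, List.map_flatMap]
  have hmap : ∀ cm : Int × String,
      ((PySem.List.enumerate (pvSpanning pd cm.2)).filterMap (fun is =>
        if is.2 = 1 then some (PySem.List.pyGetD joints is.1 "", v cm.1) else none)).map (·.1)
      = (PySem.List.enumerate (pvSpanning pd cm.2)).filterMap (fun is =>
        if is.2 = 1 then some (PySem.List.pyGetD joints is.1 "") else none) := by
    intro cm
    rw [List.map_filterMap]
    apply List.filterMap_congr
    intro is _
    by_cases h : is.2 = 1 <;> simp [h]
  -- align the fold over rM with the fold over enumerate rM (the index is unused)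
  have henum : ∀ (s : Int) (ks : List String),
      ((PySem.List.enumerate rM s).flatMap (fun cm =>
        (PySem.List.enumerate (pvSpanning pd cm.2)).filterMap (fun is =>
          if is.2 = 1 then some (PySem.List.pyGetD joints is.1 "") else none))).foldl PySem.Set.add ks
      = rM.foldl (fun ks m =>
          ((PySem.List.enumerate (pvSpanning pd m)).filterMap (fun is =>
            if is.2 = 1 then some (PySem.List.pyGetD joints is.1 "") else none)).foldl PySem.Set.add ks) ks := by
    intro s ks
    induction rM generalizing s ks with
    | nil => rfl
    | cons m ms ih => simp [PySem.List.enumerate_cons, List.foldl_append, ih]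
  simp only [hmap, henum]
  simp only [pv_keys_inner_eq]

-- ===== VERDICT (by name: the statement is the Claim_ definition above) =====
theorem getMomentArmIndices_spec : Claim_equal_getMomentArmIndices := by
  intro rM lJ rJ pd _ _
  unfold Spec_getMomentArmIndices
  have hA : getMomentArmIndices rM lJ rJ pd
      = ((PySem.List.enumerate rM).foldl (fun d cm =>
          (PySem.List.pyRange 0 (PySem.List.len (pvSpanning pd cm.2)) 1).foldl (fun d i =>
            if PySem.List.pyGetD (pvSpanning pd cm.2) i 0 = 1 then
              d.modify (PySem.List.pyGetD rJ i "") [] (fun l => l ++ [cm.1 + PySem.List.len rM])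
            else d) d)
          ((PySem.List.enumerate rM).foldl (fun d cm =>
            (PySem.List.pyRange 0 (PySem.List.len (pvSpanning pd cm.2)) 1).foldl (fun d i =>
              if PySem.List.pyGetD (pvSpanning pd cm.2) i 0 = 1 then
                d.modify (PySem.List.pyGetD lJ i "") [] (fun l => l ++ [cm.1])
              else d) d) PySem.Dict.empty)).items := rfl
  have hB : getMomentArmIndices_alt rM lJ rJ pd
      = ([lJ, rJ].foldl (fun ks joints =>
          (rM.map (fun m => pvSpanning pd m)).foldl (fun ks sp =>
            (PySem.List.pyRange 0 (PySem.List.len sp) 1).foldl (fun ks i =>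
              if PySem.List.pyGetD sp i 0 = 1 ∧ ¬ (ks.contains (PySem.List.pyGetD joints i "") = true)
              then ks ++ [PySem.List.pyGetD joints i ""] else ks) ks) ks) ([] : List String)).map
          (fun key => (key, pvSelect (rM.map (fun m => pvSpanning pd m)) lJ key ++
            (pvSelect (rM.map (fun m => pvSpanning pd m)) rJ key).map (fun c => c + PySem.List.len rM))) := rfl
  rw [hA, hB, pv_phase_eq' rM pd lJ (fun c => c), pv_phase_eq' rM pd rJ (fun c => c + PySem.List.len rM),
      ← List.foldl_append]
  set pairs : List (String × Int) :=
    pvPhase rM pd lJ (fun c => c) ++ pvPhase rM pd rJ (fun c => c + PySem.List.len rM) with hpairs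
  set d : PySem.Dict String (List Int) :=
    pairs.foldl (fun d p => d.modify p.1 [] (fun l => l ++ [p.2])) PySem.Dict.empty with hd
  have hkeys : d.keys = PySem.Set.ofList (pairs.map (·.1)) := by
    rw [hd, PySem.Dict.keys_foldl_modify_key]
    simp [PySem.Dict.keys_empty, PySem.Set.update_nil_left]
  have hnd : d.keys.Nodup := by rw [hkeys]; exact PySem.Set.nodup_ofList _
  have hgetD : ∀ k, d.getD k [] = (pairs.filter (fun p => p.1 == k)).map (·.2) := by
    intro k
    rw [hd, PySem.Dict.getD_foldl_modify_append, PySem.Dict.getD_empty]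
    simp
  have hBkeys :
      ([lJ, rJ].foldl (fun ks joints =>
        (rM.map (fun m => pvSpanning pd m)).foldl (fun ks sp =>
          (PySem.List.pyRange 0 (PySem.List.len sp) 1).foldl (fun ks i =>
            if PySem.List.pyGetD sp i 0 = 1 ∧ ¬ (ks.contains (PySem.List.pyGetD joints i "") = true)
            then ks ++ [PySem.List.pyGetD joints i ""] else ks) ks) ks) ([] : List String))
      = PySem.Set.ofList (pairs.map (·.1)) := by
    simp only [List.foldl_cons, List.foldl_nil]
    rw [pv_keys_phase_eq rM pd lJ (fun c => c),
        pv_keys_phase_eq rM pd rJ (fun c => c + PySem.List.len rM),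
        hpairs, List.map_append, PySem.Set.ofList_eq_foldl, List.foldl_append]
  rw [PySem.Dict.items_eq_map_keys d hnd [], hkeys, hBkeys]
  apply List.map_congr_left
  intro k _
  have hsl := pv_select_eq rM pd lJ k (fun c => c)
  have hsr := pv_select_eq rM pd rJ k (fun c => c + PySem.List.len rM)
  simp only [List.map_id'] at hsl
  rw [hgetD, hpairs, List.filter_append, List.map_append, ← hsl, ← hsr]
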